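-- pv_equiv track=rewrite | github.com/debashish05/Foo-Bar | Level 2 question2 enroomsalute.py | solution
-- ===== SOURCE A (Python) =====
-- def solution(s):
--     # Your code here
--     ans=0
--     count=0
--     for i in range(len(s)-1,-1,-1):
--         if s[i]=='<':
--             count=count+1
--         elif s[i]=='>':
--             ans+=count
--     return 2*ans
-- ===== SOURCE B (Python) =====
-- def solution(s):
--     # For each '<', count the '>' characters in the prefix before it; each such
--     # pair salutes twice.
--     return 2 * sum(
--         sum(1 for d in s[:i] if d == '>')
--         for i, c in enumerate(s) if c == '<'
--     )
-- ===== Notes on version B (the rewrite author's own statement) =====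
-- stated objective: idiomatic
-- what changed: Replaced A's single backward pass with a running '<' counter by a summed comprehension that, for each '<' position, counts the '>' characters in the prefix before it (prefix re-scan per position).
import Mathlib
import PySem

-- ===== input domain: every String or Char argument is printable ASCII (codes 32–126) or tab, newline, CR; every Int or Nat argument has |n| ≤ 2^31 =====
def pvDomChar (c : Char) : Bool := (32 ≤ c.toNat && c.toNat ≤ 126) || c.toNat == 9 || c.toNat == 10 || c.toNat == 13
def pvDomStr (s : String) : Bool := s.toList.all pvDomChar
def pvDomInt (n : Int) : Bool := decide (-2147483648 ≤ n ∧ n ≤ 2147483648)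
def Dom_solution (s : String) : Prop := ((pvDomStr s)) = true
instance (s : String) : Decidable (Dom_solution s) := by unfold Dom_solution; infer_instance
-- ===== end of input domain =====

-- B replaces A's backward running-counter pass by a per-'<' prefix-count comprehension (idiomatic alternative, not faster).

-- ===== PORT A =====
def solution (s : String) : Int :=
  2 * ((PySem.List.pyRange (PySem.Str.len s - 1) (-1) (-1)).foldl
    (fun (st : Int × Int) (i : Int) =>
      if PySem.List.pyGetD s.toList i ' ' == '<' then (st.1, st.2 + 1)
      else if PySem.List.pyGetD s.toList i ' ' == '>' then (st.1 + st.2, st.2)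
      else st) (0, 0)).1

-- ===== PORT B =====
def solution_alt (s : String) : Int :=
  2 * (((PySem.List.enumerate s.toList).filter (fun p => p.2 == '<')).map
        (fun p => ((PySem.List.slice s.toList none (some p.1)).countP (fun d => d == '>') : Int))).sum

-- ===== PRECONDITION & SPEC =====
def Spec_solution (s : String) (out : Int) : Prop := out = solution_alt s
instance (s : String) (out : Int) : Decidable (Spec_solution s out) := by unfold Spec_solution; infer_instance

-- ===== CLAIM (what is proved, stated in full; the proofs are below) =====
def Claim_equal_solution : Prop := ∀ (s : String), Dom_solution s → Spec_solution s (solution s)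

-- ===== LEMMAS AND PROOFS =====

-- A's loop body as a foldr step (state = (ans, count))
def pvF (x : Char) (st : Int × Int) : Int × Int :=
  if x == '<' then (st.1, st.2 + 1)
  else if x == '>' then (st.1 + st.2, st.2)
  else st

-- B's summed quantity on a char list
def pvBsum (l : List Char) : Int :=
  (((PySem.List.enumerate l).filter (fun p => p.2 == '<')).map
    (fun p => ((PySem.List.slice l none (some p.1)).countP (fun d => d == '>') : Int))).sum

theorem pv_enum_shift {α : Type} (l : List α) (s : Int) :
    PySem.List.enumerate l s = (PySem.List.enumerate l 0).map (fun p => (p.1 + s, p.2)) := by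
  induction l generalizing s with
  | nil => simp [PySem.List.enumerate_nil]
  | cons x t ih =>
    rw [PySem.List.enumerate_cons, PySem.List.enumerate_cons, ih (s + 1), ih (0 + 1)]
    simp only [List.map_cons, List.map_map]
    refine congrArg₂ List.cons (by simp) ?_
    apply List.map_congr_left
    intro p _
    simp only [zero_add, Function.comp_apply]
    ring

theorem pvF_snd (l : List Char) :
    (l.foldr pvF (0, 0)).2 = (l.countP (fun c => c == '<') : Int) := by
  induction l with
  | nil => simp
  | cons x t ih =>
    simp only [List.foldr_cons, List.countP_cons, pvF]
    by_cases h1 : x == '<'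
    · simp [h1, ih]
    · by_cases h2 : x == '>' <;> simp [h1, h2, ih]

theorem pv_countP_enum (t : List Char) :
    (PySem.List.enumerate t 0).countP (fun p => p.2 == '<') = t.countP (fun c => c == '<') := by
  conv_rhs => rw [← PySem.List.map_snd_enumerate t 0]
  rw [List.countP_map]
  rfl

theorem pv_sum_aux (x : Char) (t : List Char) (L : List (Int × Char))
    (h : ∀ p ∈ L, ∃ k : Nat, p.1 = (k : Int)) :
    ((L.map (fun p : Int × Char => (p.1 + 1, p.2))).map
       (fun p => ((PySem.List.slice (x :: t) none (some p.1)).countP (fun d => d == '>') : Int))).sum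
      = L.length * (if x == '>' then (1 : Int) else 0)
        + (L.map (fun p => ((PySem.List.slice t none (some p.1)).countP (fun d => d == '>') : Int))).sum := by
  induction L with
  | nil => simp
  | cons p L ih =>
    obtain ⟨k, hk⟩ := h p (List.mem_cons_self)
    simp only [List.map_cons, List.sum_cons]
    rw [ih (fun q hq => h q (List.mem_cons_of_mem _ hq)), hk]
    rw [show ((k : Int) + 1) = ((k + 1 : Nat) : Int) by push_cast; ring]
    rw [PySem.List.slice_to_natCast, PySem.List.slice_to_natCast, List.take_succ_cons,
        List.countP_cons]
    by_cases hx : x == '>' <;> simp [hx] <;> push_cast <;> ring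

theorem pvBsum_cons (x : Char) (t : List Char) :
    pvBsum (x :: t) = (if x == '>' then (t.countP (fun c => c == '<') : Int) else 0) + pvBsum t := by
  have hmem : ∀ p ∈ (PySem.List.enumerate t 0).filter (fun p => p.2 == '<'),
      ∃ k : Nat, p.1 = (k : Int) := by
    intro p hp
    obtain ⟨k, hk, rfl⟩ := (PySem.List.mem_enumerate_iff t 0 p).1 (List.mem_filter.1 hp).1
    exact ⟨k, by push_cast; ring⟩
  have hslice0 : PySem.List.slice (x :: t) none (some 0) = ([] : List Char) := by
    simpa using PySem.List.slice_to_natCast (xs := x :: t) (b := 0)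
  have hq : ((fun p : Int × Char => p.2 == '<') ∘ (fun p : Int × Char => (p.1 + 1, p.2)))
      = (fun p : Int × Char => p.2 == '<') := rfl
  unfold pvBsum
  rw [PySem.List.enumerate_cons, pv_enum_shift t (0 + 1)]
  simp only [zero_add]
  rw [List.filter_cons]
  by_cases hx : x == '<'
  · have hx' : x = '<' := by simpa using hx
    rw [if_pos (by simp [hx'])]
    rw [List.filter_map, hq, List.map_cons, List.sum_cons]
    rw [pv_sum_aux x t _ hmem, ← List.countP_eq_length_filter, pv_countP_enum, hslice0]
    simp [hx']
  · have hx' : ¬ (x = '<') := by simpa using hx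
    rw [if_neg (by simp [hx'])]
    rw [List.filter_map, hq]
    rw [pv_sum_aux x t _ hmem, ← List.countP_eq_length_filter, pv_countP_enum]
    by_cases hg : x == '>' <;> simp [hg]

theorem pvF_fst (l : List Char) :
    (l.foldr pvF (0, 0)).1 = pvBsum l := by
  induction l with
  | nil => simp [pvBsum, PySem.List.enumerate_nil]
  | cons x t ih =>
    rw [pvBsum_cons]
    simp only [List.foldr_cons, pvF]
    by_cases h1 : x == '<'
    · have h2 : (x == '>') = false := by
        have : x = '<' := by simpa using h1
        simp [this]
      simp [h1, h2, ih]
    · by_cases h2 : x == '>'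
      · simp [h1, h2, ih, pvF_snd]; ring
      · simp [h1, h2, ih]

theorem pv_foldA (cs : List Char) :
    ((PySem.List.pyRange ((cs.length : Int) - 1) (-1) (-1)).foldl
      (fun (st : Int × Int) (i : Int) =>
        if PySem.List.pyGetD cs i ' ' == '<' then (st.1, st.2 + 1)
        else if PySem.List.pyGetD cs i ' ' == '>' then (st.1 + st.2, st.2)
        else st) (0, 0))
    = cs.foldr pvF (0, 0) := by
  rw [PySem.List.pyRange_neg_one_eq_reverse, List.foldl_reverse]
  rw [show (-1 : Int) + 1 = 0 by norm_num, show ((cs.length : Int) - 1) + 1 = (cs.length : Int) by ring]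
  conv_rhs => rw [← PySem.List.map_pyGetD_pyRange_zero' cs ' ', List.foldr_map]
  rfl

-- ===== VERDICT (by name: the statement is the Claim_ definition above) =====
theorem solution_spec : Claim_equal_solution := by
  intro s _
  unfold Spec_solution solution solution_alt
  rw [show PySem.Str.len s = (s.toList.length : Int) from PySem.Str.len_eq s]
  rw [pv_foldA, pvF_fst]
  rfl
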